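-- pv_equiv track=rewrite | github.com/PDHung1104/why-not-provenance | firing_rules/provenance/helpers.py | split_top_level_and
-- ===== SOURCE A (Python) =====
-- from typing import Dict, List, Optional
--
-- def split_top_level_and(s: str) -> List[str]:
--     parts: List[str] = []
--     buf: List[str] = []
--     depth = 0
--     i = 0
--     upper = s.upper()
--     while i < len(s):
--         ch = s[i]
--         if ch == "(":
--             depth += 1
--         elif ch == ")":
--             depth -= 1
--
--         if depth == 0 and upper[i : i + 3] == "AND":
--             left_ok = i == 0 or upper[i - 1].isspace()
--             right_ok = i + 3 >= len(s) or upper[i + 3].isspace()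
--             if left_ok and right_ok:
--                 piece = "".join(buf).strip()
--                 if piece:
--                     parts.append(piece)
--                 buf = []
--                 i += 3
--                 continue
--
--         buf.append(ch)
--         i += 1
--
--     tail = "".join(buf).strip()
--     if tail:
--         parts.append(tail)
--     return parts
-- ===== SOURCE B (Python) =====
-- def split_top_level_and(s):
--     upper = s.upper()
--     n = len(s)
--     # pass 1: candidate AND positions (whitespace-or-edge boundaries, no depth check)
--     cands = [i for i in range(n - 2)
--              if upper[i:i + 3] == "AND"
--              and (i == 0 or upper[i - 1].isspace())
--              and (i + 3 >= n or upper[i + 3].isspace())]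
--     # pass 2: walk candidates, keeping a running top-level paren depth
--     parts = []
--     acc = ""
--     pos = 0
--     depth = 0
--     for i in cands:
--         seg = s[pos:i]
--         depth += seg.count("(") - seg.count(")")
--         if depth == 0:
--             piece = (acc + seg).strip()
--             if piece:
--                 parts.append(piece)
--             acc = ""
--         else:
--             acc = acc + seg + s[i:i + 3]
--         pos = i + 3
--     piece = (acc + s[pos:]).strip()
--     if piece:
--         parts.append(piece)
--     return parts
-- ===== Notes on version B (the rewrite author's own statement) =====
-- stated objective: faster
-- what changed: A interleaves one buffer-building while-loop with depth tracking and boundary tests per character; B first collects all candidate AND boundary positions in one scan, then a second pass walks these boundaries, tracking paren depth with bulk slice/count operations per segment instead of per-character branching.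
import Mathlib
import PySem

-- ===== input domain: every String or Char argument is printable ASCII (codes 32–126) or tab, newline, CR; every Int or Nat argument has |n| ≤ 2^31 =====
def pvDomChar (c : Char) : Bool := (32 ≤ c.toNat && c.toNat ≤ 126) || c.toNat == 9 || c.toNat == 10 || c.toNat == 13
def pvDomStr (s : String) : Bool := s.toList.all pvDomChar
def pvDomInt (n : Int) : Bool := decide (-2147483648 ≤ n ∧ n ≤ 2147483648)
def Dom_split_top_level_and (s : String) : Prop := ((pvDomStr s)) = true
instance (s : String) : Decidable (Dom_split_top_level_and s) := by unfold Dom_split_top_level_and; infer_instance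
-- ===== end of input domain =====

-- B replaces A's single interleaved buffer loop by two passes (collect candidate AND
-- boundaries first, then merge segments while tracking paren depth); objective: alternative.

-- ===== PORT A =====
-- A's while-loop over index i with state (depth, buf, parts); cs[i] / upper[i-1] / upper[i+3]
-- are read with getD only under the guards A itself has (i < len, i ≠ 0, i+3 < len): exact.
-- Python's locals ch / depth' / piece are inlined (same values, same branch structure).
def goA (cs us : List Char) (i : Nat) (depth : Int) (buf : List Char)
    (parts : List String) : List String :=
  if _h : i < cs.length then
    if (if cs.getD i ' ' = '(' then depth + 1
        else if cs.getD i ' ' = ')' then depth - 1 else depth) = 0 ∧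
        PySem.List.slice us (some (i : Int)) (some ((i : Int) + 3)) = ['A', 'N', 'D'] ∧
        (i = 0 ∨ PySem.Chars.isspace (us.getD (i - 1) ' ') = true) ∧
        (cs.length ≤ i + 3 ∨ PySem.Chars.isspace (us.getD (i + 3) ' ') = true) then
      goA cs us (i + 3)
        (if cs.getD i ' ' = '(' then depth + 1
         else if cs.getD i ' ' = ')' then depth - 1 else depth)
        []
        (if PySem.Chars.strip buf = [] then parts
         else parts ++ [String.ofList (PySem.Chars.strip buf)])
    else
      goA cs us (i + 1)
        (if cs.getD i ' ' = '(' then depth + 1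
         else if cs.getD i ' ' = ')' then depth - 1 else depth)
        (buf ++ [cs.getD i ' ']) parts
  else
    if PySem.Chars.strip buf = [] then parts
    else parts ++ [String.ofList (PySem.Chars.strip buf)]
termination_by cs.length - i

def split_top_level_and (s : String) : List String :=
  goA s.toList (PySem.Chars.upper s.toList) 0 0 [] []

-- ===== PORT B =====
-- pass 1 of B: is index i a candidate AND boundary (no depth check)?
def candB (cs us : List Char) (i : Nat) : Bool :=
  (PySem.List.slice us (some (i : Int)) (some ((i : Int) + 3)) == ['A', 'N', 'D']) &&
  (i == 0 || PySem.Chars.isspace (us.getD (i - 1) ' ')) &&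
  (decide (cs.length ≤ i + 3) || PySem.Chars.isspace (us.getD (i + 3) ' '))

-- pass 2 of B: fold over the candidate list with state (pos, depth, acc, parts).
-- seg.count("(") for a 1-character needle is exactly the character count (List.count).
def pass2 (cs : List Char) : List Nat → Nat → Int → List Char → List String → List String
  | [], pos, _depth, acc, parts =>
      let piece := PySem.Chars.strip (acc ++ PySem.List.slice cs (some (pos : Int)) none)
      if piece = [] then parts else parts ++ [String.ofList piece]
  | i :: is, pos, depth, acc, parts =>
      let seg := PySem.List.slice cs (some (pos : Int)) (some (i : Int))
      let depth' := depth + (List.count '(' seg : Int) - (List.count ')' seg : Int)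
      if depth' = 0 then
        let piece := PySem.Chars.strip (acc ++ seg)
        pass2 cs is (i + 3) depth' []
          (if piece = [] then parts else parts ++ [String.ofList piece])
      else
        pass2 cs is (i + 3) depth'
          (acc ++ seg ++ PySem.List.slice cs (some (i : Int)) (some ((i : Int) + 3))) parts

def split_top_level_and_alt (s : String) : List String :=
  let cs := s.toList
  let us := PySem.Chars.upper cs
  pass2 cs ((List.range (cs.length - 2)).filter (candB cs us)) 0 0 [] []

-- ===== PRECONDITION & SPEC =====
def Spec_split_top_level_and (s : String) (out : List String) : Prop := out = split_top_level_and_alt s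
instance (s : String) (out : List String) : Decidable (Spec_split_top_level_and s out) := by unfold Spec_split_top_level_and; infer_instance

-- ===== CLAIM (what is proved, stated in full; the proofs are below) =====
def Claim_equal_split_top_level_and : Prop := ∀ (s : String), Dom_split_top_level_and s → Spec_split_top_level_and s (split_top_level_and s)

-- ===== LEMMAS AND PROOFS =====

-- the candidates at or beyond position pos, in order
def candsFrom (cs us : List Char) (pos : Nat) : List Nat :=
  (List.range' pos (cs.length - 2 - pos)).filter (candB cs us)

lemma candsFrom_zero (cs us : List Char) :
    candsFrom cs us 0 = (List.range (cs.length - 2)).filter (candB cs us) := by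
  simp [candsFrom, List.range_eq_range']

lemma candsFrom_stop (cs us : List Char) (pos : Nat) (h : cs.length - 2 ≤ pos) :
    candsFrom cs us pos = [] := by
  simp [candsFrom, Nat.sub_eq_zero_of_le h]

lemma mem_candsFrom_ge (cs us : List Char) (pos i : Nat) (h : i ∈ candsFrom cs us pos) :
    pos ≤ i := by
  have := List.of_mem_filter h
  have hm := List.mem_of_mem_filter h
  exact (List.mem_range'_1.mp hm).1

lemma candsFrom_not (cs us : List Char) (pos : Nat) (h : candB cs us pos = false) :
    candsFrom cs us pos = candsFrom cs us (pos + 1) := by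
  unfold candsFrom
  by_cases hp : pos < cs.length - 2
  · have h1 : cs.length - 2 - pos = (cs.length - 2 - (pos + 1)) + 1 := by omega
    rw [h1, List.range'_succ, List.filter_cons, h]
    simp
  · rw [Nat.sub_eq_zero_of_le (by omega), Nat.sub_eq_zero_of_le (by omega)]
    simp

lemma candsFrom_cand (cs us : List Char) (pos : Nat) (h : candB cs us pos = true)
    (h3 : pos + 3 ≤ cs.length)
    (h1 : candB cs us (pos + 1) = false) (h2 : candB cs us (pos + 2) = false) :
    candsFrom cs us pos = pos :: candsFrom cs us (pos + 3) := by
  have hp : pos < cs.length - 2 := by omega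
  have e1 : cs.length - 2 - pos = (cs.length - 2 - (pos + 1)) + 1 := by omega
  rw [candsFrom, e1, List.range'_succ, List.filter_cons, h]
  rw [show (List.range' (pos + 1) (cs.length - 2 - (pos + 1))).filter (candB cs us)
        = candsFrom cs us (pos + 1) from rfl,
     candsFrom_not cs us (pos + 1) h1, candsFrom_not cs us (pos + 2) h2]
  simp

-- candB as a proposition (the condition A tests, minus the depth test)
lemma candB_iff (cs us : List Char) (i : Nat) :
    candB cs us i = true ↔
      (PySem.List.slice us (some (i : Int)) (some ((i : Int) + 3)) = ['A', 'N', 'D'] ∧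
       (i = 0 ∨ PySem.Chars.isspace (us.getD (i - 1) ' ') = true) ∧
       (cs.length ≤ i + 3 ∨ PySem.Chars.isspace (us.getD (i + 3) ' ') = true)) := by
  simp [candB, and_assoc]

-- one B-step that consumes a single non-candidate character into acc
lemma pass2_shift (cs : List Char) (is : List Nat) (pos : Nat) (depth : Int)
    (acc : List Char) (parts : List String) (hpos : pos < cs.length)
    (hall : ∀ i ∈ is, pos + 1 ≤ i) :
    pass2 cs is (pos + 1)
      (if cs.getD pos ' ' = '(' then depth + 1
       else if cs.getD pos ' ' = ')' then depth - 1 else depth)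
      (acc ++ [cs.getD pos ' ']) parts
    = pass2 cs is pos depth acc parts := by
  have hget : cs.getD pos ' ' = cs[pos] := List.getD_eq_getElem cs ' ' hpos
  have hdrop : cs.drop pos = cs[pos] :: cs.drop (pos + 1) := List.drop_eq_getElem_cons hpos
  cases is with
  | nil =>
      simp only [pass2, PySem.List.slice_from_natCast, hdrop, hget]
      simp
  | cons i is' =>
      have hi : pos + 1 ≤ i := hall i (List.mem_cons_self ..)
      have hseg : PySem.List.slice cs (some (pos : Int)) (some (i : Int))
          = cs[pos] :: PySem.List.slice cs (some ((pos + 1 : Nat) : Int)) (some (i : Int)) := by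
        rw [PySem.List.slice_natCast, PySem.List.slice_natCast,
          show i - pos = (i - (pos + 1)) + 1 from by omega, hdrop]
        rw [List.take_succ_cons]
      simp only [pass2, hseg, hget, List.count_cons]
      have hd : ∀ (C1 C2 : Nat),
          depth + ((C1 + if cs[pos] == '(' then 1 else 0 : Nat) : Int)
            - ((C2 + if cs[pos] == ')' then 1 else 0 : Nat) : Int)
          = (if cs[pos] = '(' then depth + 1 else if cs[pos] = ')' then depth - 1 else depth)
            + (C1 : Int) - (C2 : Int) := by
        intro C1 C2
        simp only [beq_iff_eq]
        split_ifs <;> (try simp_all) <;> omega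
      rw [hd]
      simp [List.append_assoc]

-- the base case: past the end of the string both loops flush the buffer
lemma main_base (cs us : List Char) (pos : Nat) (depth : Int) (buf : List Char)
    (parts : List String) (hpos : cs.length ≤ pos) :
    goA cs us pos depth buf parts = pass2 cs (candsFrom cs us pos) pos depth buf parts := by
  rw [candsFrom_stop cs us pos (by omega)]
  rw [goA]
  simp only [pass2, PySem.List.slice_from_natCast]
  rw [dif_neg (by omega), List.drop_eq_nil_of_le hpos]
  simp

-- facts about a candidate position: the three chars are (case-insensitive) A N D,
-- hence none of them is a parenthesis
lemma cand_facts (cs us : List Char) (pos : Nat) (hus : us = PySem.Chars.upper cs)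
    (hAND : PySem.List.slice us (some (pos : Int)) (some ((pos : Int) + 3)) = ['A', 'N', 'D']) :
    pos + 3 ≤ cs.length ∧
    us[pos]? = some 'A' ∧ us[(pos+1)]? = some 'N' ∧ us[(pos+2)]? = some 'D' ∧
    (∃ c0 c1 c2, cs[pos]? = some c0 ∧ cs[(pos+1)]? = some c1 ∧ cs[(pos+2)]? = some c2 ∧
      PySem.Chars.upperChar c0 = 'A' ∧ PySem.Chars.upperChar c1 = 'N' ∧
      PySem.Chars.upperChar c2 = 'D') := by
  have hmap : us = List.map PySem.Chars.upperChar cs := hus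
  have hlen : us.length = cs.length := by rw [hmap]; simp
  have hAND' : (us.drop pos).take 3 = ['A', 'N', 'D'] := by
    rw [show ((pos : Int) + 3) = ((pos + 3 : Nat) : Int) from by push_cast; ring] at hAND
    rw [PySem.List.slice_natCast] at hAND
    simpa [show pos + 3 - pos = 3 from by omega] using hAND
  have h3 : pos + 3 ≤ us.length := by
    have := congrArg List.length hAND'
    simp at this
    omega
  have hud : us.drop pos = 'A' :: 'N' :: 'D' :: us.drop (pos + 3) := by
    conv_lhs => rw [← List.take_append_drop 3 (us.drop pos)]
    rw [hAND', List.drop_drop]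
    simp
  have hu0 : us[pos]? = some 'A' := by
    have := (List.getElem?_drop (xs := us) (i := pos) (j := 0))
    rw [hud] at this ; simpa using this.symm
  have hu1 : us[(pos+1)]? = some 'N' := by
    have := (List.getElem?_drop (xs := us) (i := pos) (j := 1))
    rw [hud] at this ; simpa using this.symm
  have hu2 : us[(pos+2)]? = some 'D' := by
    have := (List.getElem?_drop (xs := us) (i := pos) (j := 2))
    rw [hud] at this ; simpa using this.symm
  refine ⟨by omega, hu0, hu1, hu2, ?_⟩
  have e0 := hu0; have e1 := hu1; have e2 := hu2
  rw [hmap, List.getElem?_map] at e0 e1 e2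
  cases hc0 : cs[pos]? with
  | none => rw [hc0] at e0 ; simp at e0
  | some c0 =>
    cases hc1 : cs[(pos+1)]? with
    | none => rw [hc1] at e1 ; simp at e1
    | some c1 =>
      cases hc2 : cs[(pos+2)]? with
      | none => rw [hc2] at e2 ; simp at e2
      | some c2 =>
        rw [hc0] at e0 ; rw [hc1] at e1 ; rw [hc2] at e2
        simp at e0 e1 e2
        exact ⟨c0, c1, c2, rfl, rfl, rfl, e0, e1, e2⟩

lemma upperChar_ne_paren {c : Char} {u : Char} (h : PySem.Chars.upperChar c = u)
    (hu1 : u ≠ '(') (hu2 : u ≠ ')') : c ≠ '(' ∧ c ≠ ')' := by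
  constructor
  · intro hc ; rw [hc] at h
    exact hu1 ((Eq.trans (by decide : '(' = PySem.Chars.upperChar '(') h).symm)
  · intro hc ; rw [hc] at h
    exact hu2 ((Eq.trans (by decide : ')' = PySem.Chars.upperChar ')') h).symm)

-- main invariant: A's loop from position pos equals B's pass 2 over the candidates ≥ pos
lemma main_inv (cs us : List Char) (hus : us = PySem.Chars.upper cs) :
    ∀ (n pos : Nat) (depth : Int) (buf : List Char) (parts : List String),
      cs.length - pos ≤ n →
      goA cs us pos depth buf parts = pass2 cs (candsFrom cs us pos) pos depth buf parts := by
  intro n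
  induction n with
  | zero =>
      intro pos depth buf parts hn
      exact main_base cs us pos depth buf parts (by omega)
  | succ m ih =>
      intro pos depth buf parts hn
      by_cases hpos : pos < cs.length
      · by_cases hc : candB cs us pos = true
        · -- a candidate AND position
          obtain ⟨hAND, hleft, hright⟩ := (candB_iff cs us pos).mp hc
          obtain ⟨h3, hu0, hu1, hu2, c0, c1, c2, hc0, hc1, hc2, hup0, hup1, hup2⟩ :=
            cand_facts cs us pos hus hAND
          obtain ⟨hc0l, hc0r⟩ := upperChar_ne_paren hup0 (by decide) (by decide)
          obtain ⟨hc1l, hc1r⟩ := upperChar_ne_paren hup1 (by decide) (by decide)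
          obtain ⟨hc2l, hc2r⟩ := upperChar_ne_paren hup2 (by decide) (by decide)
          have hg0 : cs.getD pos ' ' = c0 := by rw [List.getD_eq_getElem?_getD, hc0] ; rfl
          have hg1 : cs.getD (pos + 1) ' ' = c1 := by rw [List.getD_eq_getElem?_getD, hc1] ; rfl
          have hg2 : cs.getD (pos + 2) ' ' = c2 := by rw [List.getD_eq_getElem?_getD, hc2] ; rfl
          have hgu0 : us.getD pos ' ' = 'A' := by rw [List.getD_eq_getElem?_getD, hu0] ; rfl
          have hgu1 : us.getD (pos + 1) ' ' = 'N' := by rw [List.getD_eq_getElem?_getD, hu1] ; rfl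
          -- candB is false just after a candidate (the char on the left is A resp. N)
          have hb1 : candB cs us (pos + 1) = false := by
            have e : PySem.Chars.isspace (us[pos]?.getD ' ') = false := by rw [hu0] ; decide
            simp [candB, e]
          have hb2 : candB cs us (pos + 2) = false := by
            have e : PySem.Chars.isspace (us[pos + 1]?.getD ' ') = false := by rw [hu1] ; decide
            simp [candB, e]
          have hGG := candsFrom_cand cs us pos hc h3 hb1 hb2
          -- the three characters of the AND token
          have hdrop0 : cs.drop pos = c0 :: c1 :: c2 :: cs.drop (pos + 3) := by
            have e0 : cs[pos] = c0 :=
              Option.some_inj.mp ((List.getElem?_eq_getElem (by omega)).symm.trans hc0)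
            have e1 : cs[pos + 1] = c1 :=
              Option.some_inj.mp ((List.getElem?_eq_getElem (by omega)).symm.trans hc1)
            have e2 : cs[pos + 2] = c2 :=
              Option.some_inj.mp ((List.getElem?_eq_getElem (by omega)).symm.trans hc2)
            have d0 := List.drop_eq_getElem_cons (show pos < cs.length by omega) (l := cs)
            have d1 := List.drop_eq_getElem_cons (show pos + 1 < cs.length by omega) (l := cs)
            have d2 := List.drop_eq_getElem_cons (show pos + 2 < cs.length by omega) (l := cs)
            simp only [e0] at d0 ; simp only [e1] at d1
            rw [d0, d1, show pos + 1 + 1 = pos + 2 from rfl, d2,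
              show pos + 2 + 1 = pos + 3 from rfl]
            exact congrArg (fun c => c0 :: c1 :: c :: cs.drop (pos + 3)) e2
          have hseg0 : PySem.List.slice cs (some (pos : Int)) (some (pos : Int)) = [] := by
            rw [PySem.List.slice_natCast] ; simp
          have hslice3 : PySem.List.slice cs (some (pos : Int)) (some ((pos : Int) + 3))
              = [c0, c1, c2] := by
            rw [show ((pos : Int) + 3) = ((pos + 3 : Nat) : Int) from by push_cast ; ring,
              PySem.List.slice_natCast, hdrop0, show pos + 3 - pos = 3 from by omega]
            rfl
          by_cases hdz : depth = 0
          · -- top level: both versions split here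
            subst hdz
            rw [goA, dif_pos hpos, hg0, if_neg hc0l, if_neg hc0r]
            rw [if_pos ⟨rfl, hAND, hleft, hright⟩]
            rw [ih (pos + 3) 0 []
              (if PySem.Chars.strip buf = [] then parts
               else parts ++ [String.ofList (PySem.Chars.strip buf)]) (by omega)]
            rw [hGG]
            simp [pass2, hseg0]
          · -- inside parens: A copies the three chars; B merges the segment
            rw [goA, dif_pos hpos, hg0, if_neg hc0l, if_neg hc0r,
              if_neg (fun h => hdz h.1)]
            rw [goA, dif_pos (show pos + 1 < cs.length by omega), hg1,
              if_neg hc1l, if_neg hc1r, if_neg (fun h => hdz h.1)]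
            rw [goA, dif_pos (show pos + 2 < cs.length by omega), hg2,
              if_neg hc2l, if_neg hc2r, if_neg (fun h => hdz h.1)]
            rw [ih (pos + 3) depth (buf ++ [c0] ++ [c1] ++ [c2]) parts (by omega)]
            rw [hGG]
            simp only [pass2, hseg0, hslice3, List.count_nil, Nat.cast_zero]
            rw [if_neg (by simpa using hdz)]
            simp [List.append_assoc]
        · -- not a candidate: A copies one char, B's candidate list is unchanged
          have hcf : candB cs us pos = false := by simpa using hc
          rw [goA, dif_pos hpos,
            if_neg (fun h => absurd ((candB_iff cs us pos).mpr ⟨h.2.1, h.2.2.1, h.2.2.2⟩)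
              (by simp [hcf]))]
          rw [ih (pos + 1)
            (if cs.getD pos ' ' = '(' then depth + 1
             else if cs.getD pos ' ' = ')' then depth - 1 else depth)
            (buf ++ [cs.getD pos ' ']) parts (by omega)]
          rw [candsFrom_not cs us pos hcf]
          exact pass2_shift cs (candsFrom cs us (pos + 1)) pos depth buf parts hpos
            (fun i hi => mem_candsFrom_ge cs us (pos + 1) i hi)
      · exact main_base cs us pos depth buf parts (by omega)

-- ===== VERDICT (by name: the statement is the Claim_ definition above) =====
theorem split_top_level_and_spec : Claim_equal_split_top_level_and := by
  intro s _hdom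
  unfold Spec_split_top_level_and split_top_level_and split_top_level_and_alt
  rw [main_inv s.toList (PySem.Chars.upper s.toList) rfl (s.toList.length) 0 0 [] [] (by omega)]
  rw [candsFrom_zero]
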